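-- pv_equiv track=rewrite | github.com/akeemjones/my-math-roots | scripts/compress_u6_svgs.py | tally_d
-- ===== SOURCE A (Python) =====
-- def tally_d(count: int, x0: int, yt: int, yb: int, sp: int = 4) -> str:
--     """SVG path 'd' for count tally marks. Groups of 5: 4 vertical + 1 diagonal."""
--     if count <= 0:
--         return ''
--     parts, x, i = [], x0, 0
--     while i < count:
--         gs = x
--         gc = min(5, count - i)
--         if gc < 5:
--             for _ in range(gc):
--                 parts.append(f'M{x},{yt}V{yb}')
--                 x += sp
--         else:
--             for _ in range(4):
--                 parts.append(f'M{x},{yt}V{yb}')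
--                 x += sp
--             parts.append(f'M{gs-1},{yb}L{gs+4*sp},{yt}')
--             x += 3
--         i += 5
--     return ''.join(parts)
-- ===== SOURCE B (Python) =====
-- def tally_d(count: int, x0: int, yt: int, yb: int, sp: int = 4) -> str:
--     """SVG path 'd' for count tally marks. Groups of 5: 4 vertical + 1 diagonal."""
--     if count <= 0:
--         return ''
--     stride = 4 * sp + 3
--
--     def token(t: int) -> str:
--         # the output is a flat stream of tokens; token t belongs to group t//5
--         # at position t%5: positions 0-3 are verticals, position 4 the diagonal
--         # (a position-4 token exists only inside a full group, since the
--         # trailing partial group has fewer than 5 tokens).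
--         g, p = divmod(t, 5)
--         gx = x0 + g * stride
--         if p == 4:
--             return f'M{gx-1},{yb}L{gx+4*sp},{yt}'
--         return f'M{gx+p*sp},{yt}V{yb}'
--
--     return ''.join(token(t) for t in range(count))
-- ===== Notes on version B (the rewrite author's own statement) =====
-- stated objective: alternative
-- what changed: Replaces A's stateful chunked while-loop (running x cursor, per-group min/branching, nested inner loops) by a single flat map over tally index t in range(count): each output token is computed independently in closed form from divmod(t,5) (position 4 is the group's diagonal, otherwise a vertical), with no running state at all.
import Mathlib
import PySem

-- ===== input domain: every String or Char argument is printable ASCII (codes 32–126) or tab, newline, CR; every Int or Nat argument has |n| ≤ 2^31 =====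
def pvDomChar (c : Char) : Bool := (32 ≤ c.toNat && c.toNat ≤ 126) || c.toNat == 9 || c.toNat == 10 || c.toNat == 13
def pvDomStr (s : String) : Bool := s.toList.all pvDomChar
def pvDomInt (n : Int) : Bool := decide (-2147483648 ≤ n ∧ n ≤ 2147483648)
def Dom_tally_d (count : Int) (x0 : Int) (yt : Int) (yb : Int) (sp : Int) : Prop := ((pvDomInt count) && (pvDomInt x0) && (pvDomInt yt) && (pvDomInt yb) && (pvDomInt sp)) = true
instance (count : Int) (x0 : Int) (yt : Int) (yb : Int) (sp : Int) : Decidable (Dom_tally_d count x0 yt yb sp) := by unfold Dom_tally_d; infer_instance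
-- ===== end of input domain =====

-- B replaces A's stateful chunked while-loop by a flat per-token closed form over t in range(count)
-- (objective: alternative); return values proved equal on all inputs.


-- ===== PORT A =====
-- both Python sources build these exact f-strings; shared helpers for the two literals
def pvVert (x yt yb : Int) : String :=
  "M" ++ PySem.Int.toStr x ++ "," ++ PySem.Int.toStr yt ++ "V" ++ PySem.Int.toStr yb
def pvDiag (gs yt yb sp : Int) : String :=
  "M" ++ PySem.Int.toStr (gs - 1) ++ "," ++ PySem.Int.toStr yb ++ "L" ++
    PySem.Int.toStr (gs + 4 * sp) ++ "," ++ PySem.Int.toStr yt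

-- the while-loop of A, state (parts, x, i)
def tallyA_loop (count yt yb sp : Int) (parts : List String) (x i : Int) : List String :=
  if _h : i < count then
    let gs := x
    let gc := min 5 (count - i)
    if gc < 5 then
      let st := (PySem.List.pyRange 0 gc 1).foldl
        (fun (s : List String × Int) _ => (s.1 ++ [pvVert s.2 yt yb], s.2 + sp)) (parts, x)
      tallyA_loop count yt yb sp st.1 st.2 (i + 5)
    else
      let st := (PySem.List.pyRange 0 4 1).foldl
        (fun (s : List String × Int) _ => (s.1 ++ [pvVert s.2 yt yb], s.2 + sp)) (parts, x)
      tallyA_loop count yt yb sp (st.1 ++ [pvDiag gs yt yb sp]) (st.2 + 3) (i + 5)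
  else parts
termination_by (count - i).toNat
decreasing_by all_goals omega

def tally_d (count : Int) (x0 : Int) (yt : Int) (yb : Int) (sp : Int) : String :=
  if count ≤ 0 then "" else PySem.Str.join "" (tallyA_loop count yt yb sp [] x0 0)

-- ===== PORT B =====
-- Source B's token(t): group t//5, position t%5; position 4 is the diagonal, else a vertical
def pvTok (x0 yt yb sp t : Int) : String :=
  let g := PySem.Int.floordiv t 5
  let p := PySem.Int.mod t 5
  let gx := x0 + g * (4 * sp + 3)
  if p = 4 then pvDiag gx yt yb sp else pvVert (gx + p * sp) yt yb

def tally_d_alt (count : Int) (x0 : Int) (yt : Int) (yb : Int) (sp : Int) : String :=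
  if count ≤ 0 then "" else
    PySem.Str.join "" ((PySem.List.pyRange 0 count 1).map (pvTok x0 yt yb sp))

-- ===== PRECONDITION & SPEC =====
def Spec_tally_d (count : Int) (x0 : Int) (yt : Int) (yb : Int) (sp : Int) (out : String) : Prop := out = tally_d_alt count x0 yt yb sp
instance (count : Int) (x0 : Int) (yt : Int) (yb : Int) (sp : Int) (out : String) : Decidable (Spec_tally_d count x0 yt yb sp out) := by unfold Spec_tally_d; infer_instance

-- ===== CLAIM =====
def Claim_equal_tally_d : Prop := ∀ (count : Int) (x0 : Int) (yt : Int) (yb : Int) (sp : Int), Dom_tally_d count x0 yt yb sp → Spec_tally_d count x0 yt yb sp (tally_d count x0 yt yb sp)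

-- ===== LEMMAS AND PROOFS =====

-- common reference list: the marks for r remaining tallies starting at x
def specL (yt yb sp r x : Int) : List String :=
  if 5 ≤ r then
    ((PySem.List.pyRange 0 4 1).map (fun k => pvVert (x + k * sp) yt yb)) ++
      [pvDiag x yt yb sp] ++ specL yt yb sp (r - 5) (x + (4 * sp + 3))
  else (PySem.List.pyRange 0 r 1).map (fun k => pvVert (x + k * sp) yt yb)
termination_by r.toNat
decreasing_by omega

-- closed form of A's vertical-emitting inner for-loop
lemma vertFold (yt yb sp : Int) (n : Nat) : ∀ (r : Int), r = n → ∀ (parts : List String) (x : Int),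
    (PySem.List.pyRange 0 r 1).foldl
      (fun (s : List String × Int) _ => (s.1 ++ [pvVert s.2 yt yb], s.2 + sp)) (parts, x)
    = (parts ++ (PySem.List.pyRange 0 r 1).map (fun k => pvVert (x + k * sp) yt yb), x + r * sp) := by
  induction n with
  | zero =>
    intro r hr parts x
    subst hr
    simp [PySem.List.pyRange_one_eq_nil]
  | succ m ih =>
    intro r hr parts x
    subst hr
    have hsplit : PySem.List.pyRange 0 ((m : Int) + 1) 1
        = PySem.List.pyRange 0 (m : Int) 1 ++ [(m : Int)] :=
      PySem.List.pyRange_one_succ_right (by positivity)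
    push_cast
    rw [hsplit, List.foldl_append, List.map_append, ih (m : Int) rfl parts x]
    simp [List.foldl]
    ring

lemma loopA_eq (yt yb sp : Int) (n : Nat) : ∀ (count x i : Int) (parts : List String),
    (count - i).toNat = n →
    tallyA_loop count yt yb sp parts x i = parts ++ specL yt yb sp (count - i) x := by
  induction n using Nat.strong_induction_on with
  | _ n ih =>
    intro count x i parts hn
    rw [tallyA_loop]
    by_cases h : i < count
    · rw [dif_pos h]
      by_cases hlt : min 5 (count - i) < 5
      · rw [if_pos hlt]
        have hgc : min 5 (count - i) = count - i := by omega
        have hr : count - i = ((count - i).toNat : Int) := by omega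
        rw [hgc, vertFold yt yb sp (count - i).toNat (count - i) hr parts x]
        rw [ih (count - (i + 5)).toNat (by omega) count (x + (count - i) * sp) (i + 5) _ rfl]
        have hnil : specL yt yb sp (count - (i + 5)) (x + (count - i) * sp) = [] := by
          rw [specL, if_neg (by omega)]
          simp [PySem.List.pyRange_one_eq_nil, show count - (i + 5) ≤ 0 by omega]
        have hspec : specL yt yb sp (count - i) x
            = (PySem.List.pyRange 0 (count - i) 1).map (fun k => pvVert (x + k * sp) yt yb) := by
          rw [specL, if_neg (by omega)]
        rw [hnil, hspec, List.append_nil]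
      · rw [if_neg hlt]
        have h5 : 5 ≤ count - i := by omega
        rw [vertFold yt yb sp 4 4 (by norm_num) parts x]
        rw [ih (count - (i + 5)).toNat (by omega) count (x + 4 * sp + 3) (i + 5)
          (parts ++ _ ++ [pvDiag x yt yb sp]) rfl]
        have hspec : specL yt yb sp (count - i) x
            = ((PySem.List.pyRange 0 4 1).map (fun k => pvVert (x + k * sp) yt yb)) ++
              [pvDiag x yt yb sp] ++ specL yt yb sp (count - i - 5) (x + (4 * sp + 3)) := by
          rw [specL, if_pos h5]
        rw [hspec, show count - (i + 5) = count - i - 5 by ring,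
          show x + 4 * sp + 3 = x + (4 * sp + 3) by ring]
        simp [List.append_assoc]
    · rw [dif_neg h]
      have hspec : specL yt yb sp (count - i) x = [] := by
        rw [specL, if_neg (by omega)]
        simp [PySem.List.pyRange_one_eq_nil, show count - i ≤ 0 by omega]
      rw [hspec, List.append_nil]

-- token t with t%5 < 4 is the vertical at position t%5 of its group; here for group 0
lemma tok_small (x yt yb sp t : Int) (h0 : 0 ≤ t) (h4 : t < 4) :
    pvTok x yt yb sp t = pvVert (x + t * sp) yt yb := by
  have hfd : PySem.Int.floordiv t 5 = 0 :=
    (PySem.Int.floordiv_eq_iff_of_pos (by norm_num)).mpr (by omega)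
  have hmod : PySem.Int.mod t 5 = t := by
    have := PySem.Int.floordiv_mul_add_mod t 5
    omega
  simp only [pvTok]
  rw [hfd, hmod, if_neg (show t ≠ 4 by omega), zero_mul, add_zero]

-- token 4 is group 0's diagonal
lemma tok_four (x yt yb sp : Int) : pvTok x yt yb sp 4 = pvDiag x yt yb sp := by
  have hfd : PySem.Int.floordiv (4 : Int) 5 = 0 :=
    (PySem.Int.floordiv_eq_iff_of_pos (by norm_num)).mpr (by omega)
  have hmod : PySem.Int.mod (4 : Int) 5 = 4 := by
    have := PySem.Int.floordiv_mul_add_mod (4 : Int) 5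
    omega
  simp only [pvTok]
  rw [hfd, hmod, if_pos rfl, zero_mul, add_zero]

-- shifting the token index by 5 shifts the group start by one stride
lemma tok_shift (x yt yb sp t : Int) (_h0 : 0 ≤ t) :
    pvTok x yt yb sp (t + 5) = pvTok (x + (4 * sp + 3)) yt yb sp t := by
  have hq := (PySem.Int.floordiv_eq_iff_of_pos (show (0:Int) < 5 by norm_num)).mp
    (rfl : PySem.Int.floordiv t 5 = PySem.Int.floordiv t 5)
  have hfd : PySem.Int.floordiv (t + 5) 5 = PySem.Int.floordiv t 5 + 1 := by
    rw [PySem.Int.floordiv_eq_iff_of_pos (by norm_num)]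
    omega
  have hmod : PySem.Int.mod (t + 5) 5 = PySem.Int.mod t 5 := by
    have h1 := PySem.Int.floordiv_mul_add_mod (t + 5) 5
    have h2 := PySem.Int.floordiv_mul_add_mod t 5
    omega
  simp only [pvTok, hfd, hmod]
  rw [show x + (PySem.Int.floordiv t 5 + 1) * (4 * sp + 3)
      = x + (4 * sp + 3) + PySem.Int.floordiv t 5 * (4 * sp + 3) by ring]

-- B's flat token map equals the reference list
lemma tok_eq (yt yb sp : Int) (n : Nat) : ∀ (r x : Int), 0 ≤ r → r.toNat = n →
    (PySem.List.pyRange 0 r 1).map (pvTok x yt yb sp) = specL yt yb sp r x := by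
  induction n using Nat.strong_induction_on with
  | _ n ih =>
    intro r x hr hn
    by_cases h5 : 5 ≤ r
    · rw [PySem.List.pyRange_one_append 0 5 r (by norm_num) h5, List.map_append]
      have h05 : PySem.List.pyRange 0 5 1 = [0, 1, 2, 3, 4] := by decide
      have hshift : PySem.List.pyRange 5 r 1 = (PySem.List.pyRange 0 (r - 5) 1).map (· + 5) := by
        rw [PySem.List.pyRange_one 5 r, PySem.List.pyRange_one 0 (r - 5), List.map_map]
        rw [show r - 5 - 0 = r - 5 by ring]
        congr 1
        funext k
        simp
        ring
      have htail : (PySem.List.pyRange 5 r 1).map (pvTok x yt yb sp)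
          = specL yt yb sp (r - 5) (x + (4 * sp + 3)) := by
        rw [hshift, List.map_map]
        rw [← ih (r - 5).toNat (by omega) (r - 5) (x + (4 * sp + 3)) (by omega) rfl]
        apply List.map_congr_left
        intro t ht
        have := PySem.List.mem_pyRange_one.mp ht
        exact tok_shift x yt yb sp t this.1
      rw [htail, h05]
      conv_rhs => rw [specL, if_pos h5]
      have h04 : PySem.List.pyRange 0 4 1 = [0, 1, 2, 3] := by decide
      rw [h04]
      simp only [List.map_cons, List.map_nil]
      rw [tok_small x yt yb sp 0 (by norm_num) (by norm_num),
        tok_small x yt yb sp 1 (by norm_num) (by norm_num),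
        tok_small x yt yb sp 2 (by norm_num) (by norm_num),
        tok_small x yt yb sp 3 (by norm_num) (by norm_num),
        tok_four x yt yb sp]
      simp
    · rw [specL, if_neg h5]
      apply List.map_congr_left
      intro t ht
      have := PySem.List.mem_pyRange_one.mp ht
      exact tok_small x yt yb sp t this.1 (by omega)

-- ===== VERDICT =====
theorem tally_d_spec : Claim_equal_tally_d := by
  intro count x0 yt yb sp _
  show tally_d count x0 yt yb sp = tally_d_alt count x0 yt yb sp
  unfold tally_d tally_d_alt
  by_cases h : count ≤ 0
  · rw [if_pos h, if_pos h]
  · rw [if_neg h, if_neg h]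
    rw [loopA_eq yt yb sp (count - 0).toNat count x0 0 [] rfl, sub_zero, List.nil_append]
    rw [tok_eq yt yb sp count.toNat count x0 (by omega) rfl]
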